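-- pv_equiv track=rewrite | github.com/EthannP3/EthanMLCoursework | Clustering.py | TestValues
-- ===== SOURCE A (Python) =====
-- from itertools import combinations
--
-- def TestValues(y, z):
--     n = len(y)
--     CorrectCounter = 0
--     PairNumber = 0
--     for i, j in combinations(range(n), 2):
--         if (y[i] == y[j]):
--             CorrectCounter += (z[i] == z[j])
--             PairNumber += 1
--     IncorrectCounter = PairNumber - CorrectCounter
--     return IncorrectCounter, CorrectCounter, PairNumber
-- ===== SOURCE B (Python) =====
-- def TestValues(y, z):
--     # O(n) single pass per counter: running occurrence counts instead of scanning all pairs.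
--     PairNumber = 0
--     CorrectCounter = 0
--     ycounts = {}
--     for v in y:
--         c = ycounts.get(v, 0)
--         PairNumber += c
--         ycounts[v] = c + 1
--     pcounts = {}
--     for p in zip(y, z):
--         c = pcounts.get(p, 0)
--         CorrectCounter += c
--         pcounts[p] = c + 1
--     return PairNumber - CorrectCounter, CorrectCounter, PairNumber
-- ===== Notes on version B (the rewrite author's own statement) =====
-- stated objective: faster
-- what changed: Replaces the O(n^2) scan over all index pairs with one O(n) pass per counter keeping running occurrence counts in dicts (pairs seen so far with equal label / equal (label,cluster)).
import Mathlib
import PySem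

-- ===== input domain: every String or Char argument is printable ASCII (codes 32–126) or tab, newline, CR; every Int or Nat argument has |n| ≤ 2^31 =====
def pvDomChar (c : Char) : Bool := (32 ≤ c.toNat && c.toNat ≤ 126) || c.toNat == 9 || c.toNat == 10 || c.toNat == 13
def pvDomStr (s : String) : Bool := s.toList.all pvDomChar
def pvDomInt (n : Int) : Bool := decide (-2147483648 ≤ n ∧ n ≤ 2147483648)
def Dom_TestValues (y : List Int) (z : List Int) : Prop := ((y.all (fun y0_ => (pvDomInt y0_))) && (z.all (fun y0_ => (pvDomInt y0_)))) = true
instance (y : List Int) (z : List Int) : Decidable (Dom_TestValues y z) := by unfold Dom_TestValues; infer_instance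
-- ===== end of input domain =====

-- B counts pairs in one pass with running dict counters instead of A's scan over all index pairs (asymptotically faster; equal return values on Pre_).


-- ===== PORT A =====
-- y[i]/z[i] are ported as pyGetD _ _ 0: inside Pre_ every access A performs is in range, so the
-- default is never the value used (outside Pre_ the Python raises IndexError).
def TestValues (y : List Int) (z : List Int) : List Int :=
  let n : Int := PySem.List.len y
  let s :=
    (PySem.List.combinations (PySem.List.pyRange 0 n) 2).foldl
      (fun (s : Int × Int) c =>
        match c with
        | [i, j] =>
          if PySem.List.pyGetD y i 0 == PySem.List.pyGetD y j 0 then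
            (s.1 + (if PySem.List.pyGetD z i 0 == PySem.List.pyGetD z j 0 then (1:Int) else 0),
             s.2 + 1)
          else s
        | _ => s) ((0:Int), (0:Int))
  [s.2 - s.1, s.1, s.2]

-- ===== PORT B =====
def TestValues_alt (y : List Int) (z : List Int) : List Int :=
  let s1 := y.foldl
    (fun (s : Int × PySem.Dict Int Int) v =>
      let c := s.2.getD v 0
      (s.1 + c, s.2.insert v (c + 1))) ((0:Int), PySem.Dict.empty)
  let s2 := (y.zip z).foldl
    (fun (s : Int × PySem.Dict (Int × Int) Int) p =>
      let c := s.2.getD p 0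
      (s.1 + c, s.2.insert p (c + 1))) ((0:Int), PySem.Dict.empty)
  [s1.1 - s2.1, s2.1, s1.1]

-- ===== PRECONDITION & SPEC =====
-- Pre_ excludes exactly the inputs where A raises IndexError: a pair i < j with y[i] = y[j]
-- forces A to read z[j] (and z[i]), so every such j must be a valid index of z.
def Pre_TestValues (y : List Int) (z : List Int) : Prop :=
  ∀ i < y.length, ∀ j < y.length, i < j → y.getD i 0 = y.getD j 0 → j < z.length
instance (y : List Int) (z : List Int) : Decidable (Pre_TestValues y z) := by
  unfold Pre_TestValues; infer_instance
def pvWitness_TestValues : List Int × List Int := ([1, 1, 2], [3, 3, 4])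

def Spec_TestValues (y : List Int) (z : List Int) (out : List Int) : Prop := out = TestValues_alt y z
instance (y : List Int) (z : List Int) (out : List Int) : Decidable (Spec_TestValues y z out) := by unfold Spec_TestValues; infer_instance

-- ===== CLAIM (what is proved, stated in full; the proofs are below) =====
def Claim_equal_TestValues : Prop := ∀ (y : List Int) (z : List Int), Dom_TestValues y z → Pre_TestValues y z → Spec_TestValues y z (TestValues y z)

-- ===== LEMMAS AND PROOFS =====

-- number of unordered pairs of equal elements, grouped by the earlier index
def pairsEq {α : Type} [BEq α] : List α → Int
  | [] => 0
  | x :: t => (t.count x : Int) + pairsEq t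

-- B's loop: final accumulator = initial + pairsEq l + total stored count of l's elements in d
theorem b_loop {α : Type} [BEq α] [LawfulBEq α] [DecidableEq α]
    (l : List α) (d : PySem.Dict α Int) (acc : Int) :
    (l.foldl (fun (s : Int × PySem.Dict α Int) v =>
        let c := s.2.getD v 0
        (s.1 + c, s.2.insert v (c + 1))) (acc, d)).1
      = acc + pairsEq l + (l.map (fun v => d.getD v 0)).sum := by
  induction l generalizing d acc with
  | nil => simp [pairsEq]
  | cons x t ih =>
    simp only [List.foldl_cons, List.map_cons, List.sum_cons, pairsEq]
    rw [ih]
    have hmap : (t.map (fun v => (d.insert x (d.getD x 0 + 1)).getD v 0)).sum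
        = (t.map (fun v => d.getD v 0)).sum + (t.count x : Int) := by
      have : (t.map (fun v => (d.insert x (d.getD x 0 + 1)).getD v 0))
          = t.map (fun v => d.getD v 0 + (if (fun v => v == x) v = true then (1:Int) else 0)) := by
        apply List.map_congr_left
        intro v _
        rw [PySem.Dict.getD_insert]
        by_cases h : v = x <;> simp [h]
      rw [this, PySem.List.sum_map_add_int, PySem.List.sum_map_ite_one_zero, List.count]
    rw [hmap]; ring

-- A's inner accumulation over the pairs [x, a] for a ∈ t
theorem a_head_loop (x : Int × Int) (t : List (Int × Int)) (a b : Int) :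
    (t.foldl (fun (s : Int × Int) p =>
        if x.1 == p.1 then (s.1 + (if x.2 == p.2 then (1:Int) else 0), s.2 + 1) else s) (a, b))
      = (a + (t.countP (fun p => x.1 == p.1 && x.2 == p.2) : Int),
         b + (t.countP (fun p => x.1 == p.1) : Int)) := by
  induction t generalizing a b with
  | nil => simp
  | cons p t ih =>
    simp only [List.foldl_cons, List.countP_cons]
    by_cases h1 : x.1 = p.1
    · by_cases h2 : x.2 = p.2 <;> · rw [if_pos (by simpa using h1), ih] <;> simp [h1, h2] <;> omega
    · rw [if_neg (by simpa using h1)]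
      rw [ih]; simp [h1]
  termination_by t.length

-- A's fold over combinations w 2, characterised
theorem a_comb_loop (w : List (Int × Int)) (a b : Int) :
    ((PySem.List.combinations w 2).foldl
        (fun (s : Int × Int) c =>
          match c with
          | [p, q] =>
            if p.1 == q.1 then (s.1 + (if p.2 == q.2 then (1:Int) else 0), s.2 + 1) else s
          | _ => s) (a, b))
      = (a + pairsEq w, b + pairsEq (w.map Prod.fst)) := by
  induction w generalizing a b with
  | nil =>
    simp [PySem.List.combinations_nil_succ, pairsEq]
  | cons x t ih =>
    rw [PySem.List.combinations_cons_succ, PySem.List.combinations_one, List.foldl_append,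
        List.map_map, List.foldl_map]
    simp only [Function.comp_apply]
    have hstep : (t.foldl (fun (s : Int × Int) p =>
          (match [x, p] with
           | [p, q] =>
             if p.1 == q.1 then (s.1 + (if p.2 == q.2 then (1:Int) else 0), s.2 + 1) else s
           | _ => s)) (a, b))
        = (a + (t.count x : Int), b + ((t.map Prod.fst).count x.1 : Int)) := by
      rw [show (fun (s : Int × Int) p =>
          (match [x, p] with
           | [p, q] =>
             if p.1 == q.1 then (s.1 + (if p.2 == q.2 then (1:Int) else 0), s.2 + 1) else s
           | _ => s)) = (fun (s : Int × Int) p =>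
            if x.1 == p.1 then (s.1 + (if x.2 == p.2 then (1:Int) else 0), s.2 + 1) else s) from rfl,
        a_head_loop]
      simp only [Prod.mk.injEq]
      constructor
      · have hc : t.countP (fun p => x.1 == p.1 && x.2 == p.2) = t.count x := by
          rw [List.count]
          apply List.countP_congr
          intro p _
          constructor
          · intro h
            have h1 := (Bool.and_eq_true _ _).mp h
            have e1 : x.1 = p.1 := by simpa using h1.1
            have e2 : x.2 = p.2 := by simpa using h1.2
            have hpx : p = x := Prod.ext_iff.mpr ⟨e1.symm, e2.symm⟩
            simp [hpx]
          · intro h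
            have hpx : p = x := by simpa using h
            subst hpx
            simp
        rw [hc]
      · have hc : t.countP (fun p => x.1 == p.1) = (t.map Prod.fst).count x.1 := by
          rw [List.count, List.countP_map]
          apply List.countP_congr
          intro p _
          simp only [Function.comp_apply, beq_iff_eq]
          exact eq_comm
        rw [hc]
    rw [hstep, ih]
    simp only [pairsEq, List.map_cons, List.count, Prod.mk.injEq]
    constructor <;> ring
  termination_by w.length

-- the value list A indexes into: position i ↦ (y[i], z[i] or default)
def wList (y z : List Int) : List (Int × Int) :=
  (PySem.List.pyRange 0 (PySem.List.len y)).map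
    (fun i => (PySem.List.pyGetD y i 0, PySem.List.pyGetD z i 0))

theorem wList_fst (y z : List Int) : (wList y z).map Prod.fst = y := by
  unfold wList
  rw [List.map_map]
  exact PySem.List.map_pyGetD_pyRange_zero y 0

theorem wList_eq_range (y z : List Int) :
    wList y z = (List.range y.length).map (fun k => (y.getD k 0, z.getD k 0)) := by
  unfold wList
  rw [show PySem.List.len y = ((y.length : Nat) : Int) from rfl, PySem.List.pyRange_zero_natCast,
      List.map_map]
  apply List.map_congr_left
  intro k _
  simp [PySem.List.pyGetD_natCast]

theorem zip_eq_range (y z : List Int) (h : y.length ≤ z.length) :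
    y.zip z = (List.range y.length).map (fun k => (y.getD k 0, z.getD k 0)) := by
  apply List.ext_getElem
  · simp [List.length_zip]; omega
  · intro i h1 h2
    simp only [List.length_zip] at h1
    have hiy : i < y.length := lt_of_lt_of_le h1 (min_le_left _ _)
    have hiz : i < z.length := lt_of_lt_of_le h1 (min_le_right _ _)
    simp [List.getElem_zip, List.getD, List.getElem?_eq_getElem, hiy, hiz]

theorem zip_eq_take (y z : List Int) (h : z.length < y.length) :
    y.zip z = ((List.range y.length).map (fun k => (y.getD k 0, z.getD k 0))).take z.length := by
  apply List.ext_getElem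
  · simp [List.length_zip]; omega
  · intro i h1 h2
    simp only [List.length_zip] at h1
    have hiy : i < y.length := lt_of_lt_of_le h1 (min_le_left _ _)
    have hiz : i < z.length := lt_of_lt_of_le h1 (min_le_right _ _)
    simp [List.getElem_zip, List.getD, List.getElem?_eq_getElem, hiy, hiz, lt_of_lt_of_le]

-- pairs wholly-equal pairs ≤ fst-equal pairs; appending fst-fresh elements adds no equal pair
theorem count_le_countP_fst {α β : Type} [DecidableEq α] [DecidableEq β]
    (x : α × β) (t : List (α × β)) :
    t.count x ≤ t.countP (fun q => q.1 == x.1) := by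
  rw [List.count]
  apply List.countP_mono_left
  intro q _ hq
  have : q = x := by simpa using hq
  simp [this]

theorem pairsEq_nil_of_fresh {α β : Type} [DecidableEq α] [DecidableEq β]
    (t : List (α × β))
    (h : ∀ p ∈ t, t.countP (fun q => q.1 == p.1) ≤ 1) :
    pairsEq t = 0 := by
  induction t with
  | nil => rfl
  | cons x t ih =>
    have hx := h x (by simp)
    rw [List.countP_cons] at hx
    simp only [beq_self_eq_true, if_pos] at hx
    have hcp : t.countP (fun q => q.1 == x.1) = 0 := by omega
    have hc : t.count x = 0 := by
      have := count_le_countP_fst x t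
      omega
    have ih' : pairsEq t = 0 := by
      apply ih
      intro p hp
      have := h p (by simp [hp])
      rw [List.countP_cons] at this
      omega
    simp [pairsEq, hc, ih']

theorem pairsEq_append_fresh {α β : Type} [DecidableEq α] [DecidableEq β]
    (u t : List (α × β))
    (h : ∀ p ∈ t, (u ++ t).countP (fun q => q.1 == p.1) ≤ 1) :
    pairsEq (u ++ t) = pairsEq u := by
  induction u with
  | nil =>
    simp only [List.nil_append]
    rw [pairsEq_nil_of_fresh t (fun p hp => h p hp), pairsEq]
  | cons x u ih =>
    simp only [List.cons_append, pairsEq]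
    have hct : t.count x = 0 := by
      by_contra hne
      have hxmem : x ∈ t := by
        rw [← List.count_pos_iff]; omega
      have := h x hxmem
      rw [List.cons_append, List.countP_cons] at this
      simp only [beq_self_eq_true, if_pos] at this
      have h1 : t.count x ≤ t.countP (fun q => q.1 == x.1) := count_le_countP_fst x t
      have h2 : t.countP (fun q => q.1 == x.1) ≤ (u ++ t).countP (fun q => q.1 == x.1) := by
        rw [List.countP_append]; omega
      omega
    have ih' := ih (fun p hp => by
      have := h p hp
      rw [List.cons_append, List.countP_cons] at this
      rw [List.countP_append] at this ⊢
      omega)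
    rw [List.count_append, hct, ih']
    push_cast
    ring

-- under Pre_, every element of w past index len z has a fst value occurring once in y
theorem pre_unique (y z : List Int) (hpre : Pre_TestValues y z) (j : Nat)
    (hjy : j < y.length) (hjz : z.length ≤ j) :
    y.count (y.getD j 0) ≤ 1 := by
  by_contra hcnt
  have hdup : List.Duplicate (y.getD j 0) y := by
    rw [List.duplicate_iff_two_le_count]; omega
  rw [List.duplicate_iff_exists_distinct_get] at hdup
  obtain ⟨n, m, hnm, hn, hm⟩ := hdup
  have hgn : y.getD (n : Nat) 0 = y.getD j 0 := by
    simp [List.getD, List.getElem?_eq_getElem, n.isLt, ← List.get_eq_getElem, ← hn]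
  have hgm : y.getD (m : Nat) 0 = y.getD j 0 := by
    simp [List.getD, List.getElem?_eq_getElem, m.isLt, ← List.get_eq_getElem, ← hm]
  rcases lt_trichotomy (m : Nat) j with h2 | h2 | h2
  · have := hpre (m : Nat) m.isLt j hjy h2 hgm
    omega
  · have hnj : (n : Nat) < j := by
      have : (n : Nat) < (m : Nat) := hnm
      omega
    have := hpre (n : Nat) n.isLt j hjy hnj hgn
    omega
  · have := hpre j hjy (m : Nat) m.isLt h2 hgm.symm
    omega

theorem countP_fst_eq_count (w : List (Int × Int)) (a : Int) :
    w.countP (fun q => q.1 == a) = (w.map Prod.fst).count a := by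
  rw [List.count, List.countP_map]
  rfl

-- main bridge: under Pre_, pairsEq (wList y z) = pairsEq (y.zip z)
theorem pairsEq_w_eq_zip (y z : List Int) (hpre : Pre_TestValues y z) :
    pairsEq (wList y z) = pairsEq (y.zip z) := by
  rcases Nat.lt_or_ge z.length y.length with hlt | hle
  · rw [wList_eq_range, zip_eq_take y z hlt]
    set L := (List.range y.length).map (fun k => (y.getD k 0, z.getD k 0)) with hL
    have hLlen : L.length = y.length := by simp [hL]
    have hfst : L.map Prod.fst = y := by
      have h1 := wList_fst y z
      rw [wList_eq_range y z] at h1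
      exact h1
    have hfresh : ∀ p ∈ L.drop z.length, L.countP (fun q => q.1 == p.1) ≤ 1 := by
      intro p hp
      obtain ⟨m, hm, hpm⟩ := List.getElem_of_mem hp
      have hmy : z.length + m < y.length := by
        rw [List.length_drop, hLlen] at hm
        omega
      rw [List.getElem_drop] at hpm
      have hp2 : p.1 = y.getD (z.length + m) 0 := by
        rw [← hpm]
        simp [hL]
      have huniq := pre_unique y z hpre (z.length + m) hmy (by omega)
      rw [countP_fst_eq_count, hfst, hp2]
      exact huniq
    calc pairsEq L = pairsEq (L.take z.length ++ L.drop z.length) := by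
          rw [List.take_append_drop]
      _ = pairsEq (L.take z.length) := pairsEq_append_fresh _ _ (by
            intro p hp
            rw [List.take_append_drop]
            exact hfresh p hp)
  · rw [wList_eq_range, ← zip_eq_range y z hle]

theorem pairsEq_eq_count_loop (y : List Int) :
    pairsEq y = (y.foldl (fun (s : Int × PySem.Dict Int Int) v =>
        let c := s.2.getD v 0
        (s.1 + c, s.2.insert v (c + 1))) ((0:Int), PySem.Dict.empty)).1 := by
  rw [b_loop]
  have h0 : (y.map (fun v => (PySem.Dict.empty : PySem.Dict Int Int).getD v 0)).sum = 0 := by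
    simp [PySem.Dict.getD, PySem.Dict.empty, PySem.Dict.get?]
  rw [h0]
  ring

theorem pairsEq_eq_count_loop_pair (l : List (Int × Int)) :
    pairsEq l = (l.foldl (fun (s : Int × PySem.Dict (Int × Int) Int) p =>
        let c := s.2.getD p 0
        (s.1 + c, s.2.insert p (c + 1))) ((0:Int), PySem.Dict.empty)).1 := by
  rw [b_loop]
  have h0 : (l.map (fun v => (PySem.Dict.empty : PySem.Dict (Int × Int) Int).getD v 0)).sum = 0 := by
    simp [PySem.Dict.getD, PySem.Dict.empty, PySem.Dict.get?]
  rw [h0]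
  ring

-- A's whole pair scan, characterised: (correct pairs, same-label pairs)
theorem a_fold_eq (y z : List Int) :
    ((PySem.List.combinations (PySem.List.pyRange 0 (PySem.List.len y)) 2).foldl
        (fun (s : Int × Int) c =>
          match c with
          | [i, j] =>
            if PySem.List.pyGetD y i 0 == PySem.List.pyGetD y j 0 then
              (s.1 + (if PySem.List.pyGetD z i 0 == PySem.List.pyGetD z j 0 then (1:Int) else 0),
               s.2 + 1)
            else s
          | _ => s) ((0:Int), (0:Int)))
      = (pairsEq (wList y z), pairsEq y) := by
  have hb : ∀ (s : Int × Int) (c : List Int),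
      (match c with
       | [i, j] =>
         if PySem.List.pyGetD y i 0 == PySem.List.pyGetD y j 0 then
           (s.1 + (if PySem.List.pyGetD z i 0 == PySem.List.pyGetD z j 0 then (1:Int) else 0),
            s.2 + 1)
         else s
       | _ => s)
      = (match c.map (fun i => (PySem.List.pyGetD y i 0, PySem.List.pyGetD z i 0)) with
         | [p, q] =>
           if p.1 == q.1 then (s.1 + (if p.2 == q.2 then (1:Int) else 0), s.2 + 1) else s
         | _ => s) := by
    intro s c
    match c with
    | [] => rfl
    | [_] => rfl
    | [_, _] => rfl
    | _ :: _ :: _ :: _ => rfl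
  calc ((PySem.List.combinations (PySem.List.pyRange 0 (PySem.List.len y)) 2).foldl
        (fun (s : Int × Int) c =>
          match c with
          | [i, j] =>
            if PySem.List.pyGetD y i 0 == PySem.List.pyGetD y j 0 then
              (s.1 + (if PySem.List.pyGetD z i 0 == PySem.List.pyGetD z j 0 then (1:Int) else 0),
               s.2 + 1)
            else s
          | _ => s) ((0:Int), (0:Int)))
      = ((PySem.List.combinations (PySem.List.pyRange 0 (PySem.List.len y)) 2).foldl
          (fun (s : Int × Int) c =>
            match c.map (fun i => (PySem.List.pyGetD y i 0, PySem.List.pyGetD z i 0)) with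
            | [p, q] =>
              if p.1 == q.1 then (s.1 + (if p.2 == q.2 then (1:Int) else 0), s.2 + 1) else s
            | _ => s) ((0:Int), (0:Int))) := by
        apply PySem.List.foldl_congr_mem
        intro acc x _
        exact hb acc x
    _ = (((PySem.List.combinations (PySem.List.pyRange 0 (PySem.List.len y)) 2).map
          (List.map (fun i => (PySem.List.pyGetD y i 0, PySem.List.pyGetD z i 0)))).foldl
          (fun (s : Int × Int) c =>
            match c with
            | [p, q] =>
              if p.1 == q.1 then (s.1 + (if p.2 == q.2 then (1:Int) else 0), s.2 + 1) else s
            | _ => s) ((0:Int), (0:Int))) := by rw [List.foldl_map]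
    _ = ((PySem.List.combinations (wList y z) 2).foldl
          (fun (s : Int × Int) c =>
            match c with
            | [p, q] =>
              if p.1 == q.1 then (s.1 + (if p.2 == q.2 then (1:Int) else 0), s.2 + 1) else s
            | _ => s) ((0:Int), (0:Int))) := by
        rw [← PySem.List.combinations_map]
        rfl
    _ = (0 + pairsEq (wList y z), 0 + pairsEq ((wList y z).map Prod.fst)) := a_comb_loop _ 0 0
    _ = (pairsEq (wList y z), pairsEq y) := by rw [wList_fst]; ring_nf

-- ===== VERDICT (by name: the statement is the Claim_ definition above) =====
theorem TestValues_spec : Claim_equal_TestValues := by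
  intro y z _hdom hpre
  simp only [Spec_TestValues, TestValues, TestValues_alt]
  rw [a_fold_eq y z, ← pairsEq_eq_count_loop, ← pairsEq_eq_count_loop_pair,
      pairsEq_w_eq_zip y z hpre]
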